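-- pv_equiv track=rewrite | github.com/NEA-Project-CCG/NEA | Pygame_clicks_logic.py | campaign_node
-- ===== SOURCE A (Python) =====
-- def campaign_node(pos_x, state):
--     for i in range(10):
--         if pos_x >= (70 * (i) + 55) and pos_x <= (70 * (i) + 95):
--             if len(state) < len("campaign_x_x_"):
--                 state += f"_{i}"
--             elif state[len(state) - 1] != f"{i}":
--                 state = state[:(len(state) - 1)] + f"{i}"
--
--     return state
-- ===== SOURCE B (Python) =====
-- def campaign_node(pos_x, state):
--     i = (pos_x - 55) // 70
--     if 0 <= i <= 9 and pos_x - 70 * i - 55 <= 40: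
--         if len(state) < len("campaign_x_x_"):
--             state += f"_{i}"
--         elif state[len(state) - 1] != f"{i}":
--             state = state[:(len(state) - 1)] + f"{i}"
--     return state
-- ===== Notes on version B (the rewrite author's own statement) =====
-- stated objective: simpler
-- what changed: Replaces the 10-iteration range scan with a direct arithmetic lookup: the candidate node index is computed as (pos_x - 55) // 70 and validated once, keeping the identical state-update block.
import Mathlib
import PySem

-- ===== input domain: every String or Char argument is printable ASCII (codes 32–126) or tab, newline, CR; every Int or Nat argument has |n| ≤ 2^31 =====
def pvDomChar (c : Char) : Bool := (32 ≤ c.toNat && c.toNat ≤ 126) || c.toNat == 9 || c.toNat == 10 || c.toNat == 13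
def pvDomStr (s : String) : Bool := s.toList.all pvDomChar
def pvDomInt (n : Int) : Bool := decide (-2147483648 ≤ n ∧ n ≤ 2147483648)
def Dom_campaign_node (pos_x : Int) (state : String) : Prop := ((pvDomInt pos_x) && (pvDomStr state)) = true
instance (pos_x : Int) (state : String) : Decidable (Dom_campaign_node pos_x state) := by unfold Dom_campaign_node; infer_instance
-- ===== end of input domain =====

-- B replaces A's 10-iteration range scan with a single floor-division index lookup (same update block); objective: simpler.


-- ===== PORT A =====
-- the state-update block shared verbatim by both Pythons (append "_{i}" when short, else replace last char)
def campUpd (i : Int) (st : List Char) : List Char :=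
  if PySem.Chars.len st < PySem.Chars.len "campaign_x_x_".toList then
    st ++ '_' :: PySem.Int.toChars i
  else if (PySem.List.pyGet? st ((PySem.Chars.len st : Int) - 1)).map (fun c => [c]) ≠
      some (PySem.Int.toChars i) then
    PySem.Chars.slice st none (some ((PySem.Chars.len st : Int) - 1)) ++ PySem.Int.toChars i
  else st

def campaign_node (pos_x : Int) (state : String) : String :=
  String.ofList ((PySem.List.pyRange 0 10 1).foldl
    (fun st i => if 70 * i + 55 ≤ pos_x ∧ pos_x ≤ 70 * i + 95 then campUpd i st else st)
    state.toList)

-- ===== PORT B =====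
def campaign_node_alt (pos_x : Int) (state : String) : String :=
  let i := PySem.Int.floordiv (pos_x - 55) 70
  if 0 ≤ i ∧ i ≤ 9 ∧ pos_x - 70 * i - 55 ≤ 40 then
    String.ofList (campUpd i state.toList)
  else state

-- ===== PRECONDITION & SPEC =====
def Spec_campaign_node (pos_x : Int) (state : String) (out : String) : Prop := out = campaign_node_alt pos_x state
instance (pos_x : Int) (state : String) (out : String) : Decidable (Spec_campaign_node pos_x state out) := by unfold Spec_campaign_node; infer_instance

-- ===== CLAIM (what is proved, stated in full; the proofs are below) =====
def Claim_equal_campaign_node : Prop := ∀ (pos_x : Int) (state : String), Dom_campaign_node pos_x state → Spec_campaign_node pos_x state (campaign_node pos_x state)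

-- ===== LEMMAS AND PROOFS =====

-- iterations whose range test fails leave the state unchanged
theorem camp_fold_skip (pos_x : Int) (l : List Int) (st : List Char)
    (h : ∀ i ∈ l, ¬(70 * i + 55 ≤ pos_x ∧ pos_x ≤ 70 * i + 95)) :
    l.foldl (fun st i => if 70 * i + 55 ≤ pos_x ∧ pos_x ≤ 70 * i + 95 then campUpd i st else st) st = st := by
  induction l generalizing st with
  | nil => rfl
  | cons a l ih =>
    simp only [List.foldl_cons, if_neg (h a (by simp))]
    exact ih st (fun i hi => h i (by simp [hi]))

theorem campaign_node_spec : Claim_equal_campaign_node := by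
  intro pos_x state _
  unfold Spec_campaign_node campaign_node campaign_node_alt
  set q : Int := PySem.Int.floordiv (pos_x - 55) 70 with hqdef
  have hkey : q * 70 + PySem.Int.mod (pos_x - 55) 70 = pos_x - 55 :=
    PySem.Int.floordiv_mul_add_mod (pos_x - 55) 70
  have hm0 : 0 ≤ PySem.Int.mod (pos_x - 55) 70 := PySem.Int.mod_nonneg _ (by norm_num)
  have hm1 : PySem.Int.mod (pos_x - 55) 70 < 70 := PySem.Int.mod_lt _ (by norm_num)
  -- any i that passes the range test equals q
  have huniq : ∀ i : Int, 70 * i + 55 ≤ pos_x → pos_x ≤ 70 * i + 95 → i = q := by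
    intro i h1 h2; omega
  by_cases hhit : 0 ≤ q ∧ q ≤ 9 ∧ pos_x - 70 * q - 55 ≤ 40
  · rw [if_pos hhit]
    obtain ⟨hq0, hq9, hr⟩ := hhit
    have hsplit : PySem.List.pyRange 0 10 1 =
        PySem.List.pyRange 0 q 1 ++ PySem.List.pyRange q 10 1 :=
      PySem.List.pyRange_one_append 0 q 10 hq0 (by omega)
    have hcons : PySem.List.pyRange q 10 1 = q :: PySem.List.pyRange (q + 1) 10 1 :=
      PySem.List.pyRange_one_cons (by omega)
    rw [hsplit, List.foldl_append, hcons, List.foldl_cons]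
    rw [camp_fold_skip pos_x _ _ (by
      intro i hi
      rw [PySem.List.mem_pyRange_one] at hi
      rintro ⟨h1, h2⟩
      have := huniq i h1 h2; omega)]
    rw [if_pos ⟨by omega, by omega⟩]
    rw [camp_fold_skip pos_x _ _ (by
      intro i hi
      rw [PySem.List.mem_pyRange_one] at hi
      rintro ⟨h1, h2⟩
      have := huniq i h1 h2; omega)]
  · rw [if_neg hhit]
    rw [camp_fold_skip pos_x _ _ (by
      intro i hi
      rw [PySem.List.mem_pyRange_one] at hi
      rintro ⟨h1, h2⟩
      have := huniq i h1 h2; omega)]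
    exact String.ofList_toList
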